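-- pv_equiv track=rewrite | github.com/Elias-Dams/Bioinformatics-assignment | multi_sequence_aligner.py | _get_previous_neighbours
-- ===== SOURCE A (Python) =====
-- import itertools
--
-- def _get_previous_neighbours(index: tuple) -> list[tuple[int, ...]]:
--     """Generates previous neighbours for a given index, considering all combinations of decrementing each index
--     by 0 or 1."""
--     num_sequences = len(index)
--     offsets = itertools.product([-1, 0], repeat=num_sequences)
--     neighbours = [
--         neighbour
--         for neighbour in (tuple(map(sum, zip(index, offset))) for offset in offsets if any(offset))
--         if all(n >= 0 for n in neighbour)
--     ]
--     return neighbours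
-- ===== SOURCE B (Python) =====
-- def _get_previous_neighbours(index: tuple) -> list:
--     """Recursive branch-and-prune builder: at each coordinate try -1 first
--     (only when it stays non-negative), then 0; emit only tuples where at
--     least one coordinate was decremented."""
--     n = len(index)
--     out = []
--
--     def go(i, acc, decremented):
--         if i == n:
--             if decremented:
--                 out.append(tuple(acc))
--             return
--         v = index[i]
--         if v >= 1:
--             acc.append(v - 1)
--             go(i + 1, acc, True)
--             acc.pop()
--         if v >= 0:
--             acc.append(v)
--             go(i + 1, acc, decremented)
--             acc.pop()
--
--     go(0, [], False)
--     return out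
-- ===== Notes on version B (the rewrite author's own statement) =====
-- stated objective: faster
-- what changed: Replaces the itertools.product offset enumeration plus two filtering passes with a recursive per-coordinate builder that tries -1 then 0, prunes branches whose coordinate would go negative as it descends, and emits only tuples with at least one decrement, so no post-filtering pass exists.
import Mathlib
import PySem

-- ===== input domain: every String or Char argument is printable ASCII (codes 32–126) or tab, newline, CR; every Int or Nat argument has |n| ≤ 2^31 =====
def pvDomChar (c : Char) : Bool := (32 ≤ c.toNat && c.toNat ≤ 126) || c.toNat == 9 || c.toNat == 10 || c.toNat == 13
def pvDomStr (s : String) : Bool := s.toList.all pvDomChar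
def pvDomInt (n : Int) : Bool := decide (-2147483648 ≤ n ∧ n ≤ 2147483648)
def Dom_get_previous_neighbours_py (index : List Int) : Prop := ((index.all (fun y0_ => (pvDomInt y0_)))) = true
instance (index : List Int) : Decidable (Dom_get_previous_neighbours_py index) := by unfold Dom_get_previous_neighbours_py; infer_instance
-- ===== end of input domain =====

-- B is a recursive branch-and-prune builder (try -1 then 0 per coordinate) instead of A's
-- product-of-offsets enumeration followed by two filtering passes; same values, same order.

-- ===== PORT A =====
-- itertools.product([-1, 0], repeat=n): leftmost coordinate varies slowest
def pvProductNeg10 (n : Nat) : List (List Int) :=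
  match n with
  | 0 => [[]]
  | n + 1 => ([-1, 0] : List Int).flatMap (fun o => (pvProductNeg10 n).map (fun t => o :: t))

def get_previous_neighbours_py (index : List Int) : List (List Int) :=
  let offsets := pvProductNeg10 index.length
  -- inner generator: tuple(map(sum, zip(index, offset))) for offset in offsets if any(offset)
  let gen := (offsets.filter (fun o => o.any (fun x => x != 0))).map
      (fun o => (index.zip o).map (fun p => p.1 + p.2))
  -- outer comprehension filter: all(n >= 0 for n in neighbour)
  gen.filter (fun nb => nb.all (fun n => n ≥ 0))

-- ===== PORT B =====
-- go: position-by-position builder; `dec` = some coordinate already decremented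
def gpnAltGo (index : List Int) (dec : Bool) : List (List Int) :=
  match index with
  | [] => if dec then [[]] else []
  | v :: rest =>
      (if v ≥ 1 then (gpnAltGo rest true).map (fun t => (v - 1) :: t) else []) ++
      (if v ≥ 0 then (gpnAltGo rest dec).map (fun t => v :: t) else [])

def get_previous_neighbours_py_alt (index : List Int) : List (List Int) :=
  gpnAltGo index false

-- ===== PRECONDITION & SPEC =====
def Spec_get_previous_neighbours_py (index : List Int) (out : List (List Int)) : Prop := out = get_previous_neighbours_py_alt index
instance (index : List Int) (out : List (List Int)) : Decidable (Spec_get_previous_neighbours_py index out) := by unfold Spec_get_previous_neighbours_py; infer_instance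

-- ===== CLAIM (what is proved, stated in full; the proofs are below) =====
def Claim_equal_get_previous_neighbours_py : Prop := ∀ (index : List Int), Dom_get_previous_neighbours_py index → Spec_get_previous_neighbours_py index (get_previous_neighbours_py index)

-- ===== LEMMAS AND PROOFS =====

-- A's pipeline with the all-zero-offset exclusion generalized by the flag `dec`
def gpnPipe (index : List Int) (dec : Bool) : List (List Int) :=
  (((pvProductNeg10 index.length).filter (fun o => dec || o.any (fun x => x != 0))).map
      (fun o => (index.zip o).map (fun p => p.1 + p.2))).filter
    (fun nb => nb.all (fun n => n ≥ 0))

theorem gpnAltGo_eq_pipe (index : List Int) (dec : Bool) :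
    gpnAltGo index dec = gpnPipe index dec := by
  induction index generalizing dec with
  | nil =>
    cases dec <;> simp [gpnAltGo, gpnPipe, pvProductNeg10]
  | cons v rest ih =>
    simp only [gpnAltGo, ih, gpnPipe, pvProductNeg10, List.length_cons, List.flatMap_cons,
      List.flatMap_nil, List.append_nil, List.filter_append, List.filter_map, List.map_append,
      List.map_map, Function.comp_def, List.zip_cons_cons, List.map_cons, List.any_cons,
      List.all_cons, List.filter_filter]
    by_cases h1 : v ≥ 1
    · have h0 : v ≥ 0 := by omega
      have hm1 : v + -1 = v - 1 := by ring
      simp [h1, h0, hm1]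
    · have ha : ¬ (v + -1 ≥ 0) := by omega
      by_cases h0 : v ≥ 0 <;> simp [h1, h0, ha]

-- ===== VERDICT (by name: the statement is the Claim_ definition above) =====
theorem get_previous_neighbours_py_spec : Claim_equal_get_previous_neighbours_py := by
  intro index _
  unfold Spec_get_previous_neighbours_py get_previous_neighbours_py_alt get_previous_neighbours_py
  rw [gpnAltGo_eq_pipe]
  simp [gpnPipe]
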